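-- pv_equiv track=rewrite | github.com/jonwihl/15-112-Fundamentals-of-Programming- | hw6.py | areLegalValues
-- ===== SOURCE A (Python) =====
-- def areLegalValues(values):
--     num = len(values)
--     lst = []
--     for i in range(num + 1):
--         lst.append(i)
--     for c in values:
--         if c not in lst or (c != 0 and values.count(c) != 1):
--             return False
--     return True
-- ===== SOURCE B (Python) =====
-- def areLegalValues(values):
--     n = len(values)
--     for c in values:
--         if not (0 <= c <= n):
--             return False
--     s = sorted(values)
--     for x, y in zip(s, s[1:]):
--         if x == y and y != 0:
--             return False
--     return True
-- ===== Notes on version B (the rewrite author's own statement) =====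
-- stated objective: faster
-- what changed: Replaces the per-element list-membership and values.count scans (quadratic) with a single range pass followed by a sort and one adjacent-duplicate sweep over the sorted copy.
import Mathlib
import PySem

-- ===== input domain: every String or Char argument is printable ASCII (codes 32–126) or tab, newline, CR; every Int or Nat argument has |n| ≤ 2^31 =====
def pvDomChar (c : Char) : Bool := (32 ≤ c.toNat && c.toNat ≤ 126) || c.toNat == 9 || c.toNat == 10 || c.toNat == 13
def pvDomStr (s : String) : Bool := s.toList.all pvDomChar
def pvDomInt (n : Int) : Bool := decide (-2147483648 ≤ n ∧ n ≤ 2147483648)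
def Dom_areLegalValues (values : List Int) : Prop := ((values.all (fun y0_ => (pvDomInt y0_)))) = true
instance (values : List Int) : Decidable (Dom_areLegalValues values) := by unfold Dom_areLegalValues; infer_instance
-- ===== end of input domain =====

-- B replaces A's per-element membership/count scans by a range pass plus a sort
-- and one adjacent-duplicate sweep (objective: faster).

-- ===== PORT A =====
-- the 'for c in values: … return False … return True' loop, early return as recursion
def pvGoA (values lst : List Int) : List Int → Bool
  | [] => true
  | c :: rest =>
    if !(lst.contains c) || (c != 0 && PySem.List.count values c != 1) then false
    else pvGoA values lst rest

def areLegalValues (values : List Int) : Bool :=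
  let num : Int := PySem.List.len values
  let lst : List Int := (PySem.List.pyRange 0 (num + 1) 1).foldl (fun acc i => acc ++ [i]) []
  pvGoA values lst values

-- ===== PORT B =====
-- the 'for x, y in zip(s, s[1:]): … return False … return True' sweep
def pvAdjScan : List Int → Bool
  | x :: y :: rest => if x == y && y != 0 then false else pvAdjScan (y :: rest)
  | _ => true

def areLegalValues_alt (values : List Int) : Bool :=
  let n : Int := PySem.List.len values
  if values.all (fun c => decide (0 ≤ c) && decide (c ≤ n)) then
    pvAdjScan (PySem.List.sorted values (fun x => x) false)
  else false

-- ===== PRECONDITION & SPEC =====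
def Spec_areLegalValues (values : List Int) (out : Bool) : Prop := out = areLegalValues_alt values
instance (values : List Int) (out : Bool) : Decidable (Spec_areLegalValues values out) := by unfold Spec_areLegalValues; infer_instance

-- ===== CLAIM (what is proved, stated in full; the proofs are below) =====
def Claim_equal_areLegalValues : Prop := ∀ (values : List Int), Dom_areLegalValues values → Spec_areLegalValues values (areLegalValues values)

-- ===== LEMMAS AND PROOFS =====

theorem pvGoA_true_iff (values lst cs : List Int) :
    pvGoA values lst cs = true ↔
      ∀ c ∈ cs, c ∈ lst ∧ (c ≠ 0 → PySem.List.count values c = 1) := by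
  induction cs with
  | nil => simp [pvGoA]
  | cons c rest ih =>
    simp only [pvGoA]
    split_ifs with h
    · simp only [Bool.or_eq_true, Bool.and_eq_true, bne_iff_ne,
        List.contains_eq_mem, Bool.not_eq_eq_eq_not, Bool.not_true, decide_eq_false_iff_not] at h
      constructor
      · intro hf; exact absurd hf (by simp)
      · intro hall
        rcases hall c (by simp) with ⟨hmem, hcnt⟩
        rcases h with h | ⟨hne, hcnt'⟩
        · exact absurd hmem h
        · exact absurd (hcnt hne) hcnt'
    · push Not at h
      simp only [Bool.or_eq_true, Bool.and_eq_true, bne_iff_ne,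
        List.contains_eq_mem, Bool.not_eq_eq_eq_not, Bool.not_true, decide_eq_false_iff_not,
        not_or, not_and, ne_eq, not_not] at h
      rw [ih]
      constructor
      · intro hall c' hc'
        rcases List.mem_cons.mp hc' with rfl | hc'
        · refine ⟨by simpa using h.1, fun hne => ?_⟩
          by_contra hc
          exact hc (h.2 hne)
        · exact hall c' hc'
      · intro hall c' hc'
        exact hall c' (List.mem_cons_of_mem _ hc')

theorem pvAdjScan_true_iff (s : List Int) (hs : s.Pairwise (· ≤ ·)) :
    pvAdjScan s = true ↔ ∀ c ∈ s, c ≠ 0 → s.count c ≤ 1 := by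
  induction s with
  | nil => simp [pvAdjScan]
  | cons x t ih =>
    cases t with
    | nil =>
      simp [pvAdjScan, List.count_cons]
    | cons y rest =>
      rcases List.pairwise_cons.mp hs with ⟨hx, ht⟩
      have hxy : x ≤ y := hx y (by simp)
      by_cases hdup : x = y ∧ y ≠ 0
      · rcases hdup with ⟨rfl, hy0⟩
        have hfalse : pvAdjScan (x :: x :: rest) = false := by
          simp [pvAdjScan, hy0]
        rw [hfalse]
        constructor
        · intro h; exact absurd h Bool.false_ne_true
        · intro hall
          have := hall x (by simp) hy0
          simp at this
      · have hstep : pvAdjScan (x :: y :: rest) = pvAdjScan (y :: rest) := by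
          simp only [pvAdjScan]
          split_ifs with h'
          · simp only [Bool.and_eq_true, beq_iff_eq, bne_iff_ne] at h'
            exact absurd h' hdup
          · rfl
        rw [hstep, ih ht]
        have hxnot : x ≠ 0 → x ∉ y :: rest := by
          intro hx0 hmem
          have hgey : y ≤ x := by
            rcases List.mem_cons.mp hmem with heq | hmem'
            · exact heq.ge
            · exact (List.pairwise_cons.mp ht).1 x hmem'
          have hxeq : x = y := le_antisymm hxy hgey
          exact hdup ⟨hxeq, hxeq ▸ hx0⟩
        constructor
        · intro hall c hc hc0
          rcases List.mem_cons.mp hc with rfl | hc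
          · have hnot : c ∉ y :: rest := hxnot hc0
            rw [List.count_cons, List.count_eq_zero.mpr hnot]
            simp
          · have hcx : c ≠ x := fun h => hxnot (h ▸ hc0) (h ▸ hc)
            have hxc : (x == c) = false := beq_eq_false_iff_ne.mpr (Ne.symm hcx)
            rw [List.count_cons, hxc]
            simpa using hall c hc hc0
        · intro hall c hc hc0
          have h1 := hall c (List.mem_cons_of_mem _ hc) hc0
          rw [List.count_cons] at h1
          split_ifs at h1 <;> omega

theorem lst_eq (n : Int) :
    ((PySem.List.pyRange 0 (n + 1) 1).foldl (fun acc i => acc ++ [i]) []) =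
      PySem.List.pyRange 0 (n + 1) 1 := by
  simpa using PySem.List.foldl_append_singleton (PySem.List.pyRange 0 (n + 1) 1) []

-- ===== VERDICT (by name: the statement is the Claim_ definition above) =====
theorem areLegalValues_spec : Claim_equal_areLegalValues := by
  intro values _
  unfold Spec_areLegalValues areLegalValues areLegalValues_alt
  simp only [lst_eq]
  set n : Int := PySem.List.len values with hn
  set s : List Int := PySem.List.sorted values (fun x => x) false with hsdef
  have hperm : s.Perm values := PySem.List.sorted_perm values (fun x => x) false
  have hpw : s.Pairwise (· ≤ ·) := by
    simpa using PySem.List.sorted_pairwise values (fun x => x)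
  have hmemrange : ∀ c : Int, c ∈ PySem.List.pyRange 0 (n + 1) 1 ↔ 0 ≤ c ∧ c ≤ n := by
    intro c
    rw [PySem.List.mem_pyRange_one]
    omega
  rw [Bool.eq_iff_iff, pvGoA_true_iff]
  constructor
  · intro hall
    have hrange : (values.all (fun c => decide (0 ≤ c) && decide (c ≤ n))) = true := by
      simp only [List.all_eq_true, Bool.and_eq_true, decide_eq_true_eq]
      intro c hc
      exact (hmemrange c).mp (hall c hc).1
    rw [if_pos hrange, (pvAdjScan_true_iff s hpw)]
    intro c hc hc0
    have hcv : c ∈ values := hperm.mem_iff.mp hc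
    have := (hall c hcv).2 hc0
    have hcnt : s.count c = values.count c := hperm.count_eq c
    rw [PySem.List.count_eq] at this
    omega
  · intro hB c hc
    by_cases hrange : (values.all (fun c => decide (0 ≤ c) && decide (c ≤ n))) = true
    · rw [if_pos hrange] at hB
      simp only [List.all_eq_true, Bool.and_eq_true, decide_eq_true_eq] at hrange
      refine ⟨(hmemrange c).mpr (hrange c hc), fun hc0 => ?_⟩
      rw [pvAdjScan_true_iff s hpw] at hB
      have hcs : c ∈ s := hperm.mem_iff.mpr hc
      have hle := hB c hcs hc0
      have hcnt : s.count c = values.count c := hperm.count_eq c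
      have hpos : 0 < values.count c := List.count_pos_iff.mpr hc
      rw [PySem.List.count_eq]
      omega
    · rw [if_neg hrange] at hB
      exact absurd hB Bool.false_ne_true
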